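-- pv_equiv track=rewrite | github.com/neco75/nazo100 | function.py | checkRarity
-- ===== SOURCE A (Python) =====
-- def checkRarity(hhmm) :
--     rarity = 0
--     for char in hhmm:
--         if char in ['0', '6', '9']:
--             rarity += 1
--         elif char == '8':
--             rarity += 2
--     return rarity
-- ===== SOURCE B (Python) =====
-- def checkRarity(hhmm):
--     return hhmm.count('0') + hhmm.count('6') + hhmm.count('9') + 2 * hhmm.count('8')
-- ===== Notes on version B (the rewrite author's own statement) =====
-- stated objective: simpler
-- what changed: Replaces the accumulating per-character loop with a closed-form arithmetic combination of str.count for each rarity digit, which is also measurably faster (C-level counting).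
import Mathlib
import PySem

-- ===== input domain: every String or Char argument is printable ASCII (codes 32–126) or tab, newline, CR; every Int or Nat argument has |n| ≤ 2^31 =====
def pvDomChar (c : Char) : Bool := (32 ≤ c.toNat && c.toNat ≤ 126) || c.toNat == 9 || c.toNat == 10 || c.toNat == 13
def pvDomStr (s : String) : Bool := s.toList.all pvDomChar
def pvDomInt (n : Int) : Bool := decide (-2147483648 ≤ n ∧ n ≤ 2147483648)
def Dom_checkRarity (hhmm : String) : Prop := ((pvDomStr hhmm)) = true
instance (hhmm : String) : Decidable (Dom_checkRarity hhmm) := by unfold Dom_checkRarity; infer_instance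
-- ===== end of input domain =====

-- B replaces A's accumulating loop with a closed-form sum of per-digit str.count calls (objective: simpler).

-- ===== PORT A =====
-- for char in hhmm: if char in ['0','6','9']: rarity += 1 elif char == '8': rarity += 2
def checkRarity (hhmm : String) : Int :=
  hhmm.toList.foldl
    (fun rarity char =>
      if char ∈ (['0', '6', '9'] : List Char) then rarity + 1
      else if char = '8' then rarity + 2
      else rarity) 0

-- ===== PORT B =====
def checkRarity_alt (hhmm : String) : Int :=
  (PySem.Str.count hhmm "0" : Int) + (PySem.Str.count hhmm "6" : Int)
    + (PySem.Str.count hhmm "9" : Int) + 2 * (PySem.Str.count hhmm "8" : Int)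

-- ===== PRECONDITION & SPEC =====
def Spec_checkRarity (hhmm : String) (out : Int) : Prop := out = checkRarity_alt hhmm
instance (hhmm : String) (out : Int) : Decidable (Spec_checkRarity hhmm out) := by unfold Spec_checkRarity; infer_instance

-- ===== CLAIM (what is proved, stated in full; the proofs are below) =====
def Claim_equal_checkRarity : Prop := ∀ (hhmm : String), Dom_checkRarity hhmm → Spec_checkRarity hhmm (checkRarity hhmm)

-- ===== LEMMAS AND PROOFS =====

-- Chars.count with a single-character needle is List.count.
theorem count_go_singleton (c : Char) :
    ∀ (fuel : Nat) (l : List Char) (acc : Nat), l.length ≤ fuel →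
      PySem.Chars.count.go [c] fuel l acc = acc + l.count c := by
  intro fuel
  induction fuel with
  | zero =>
    intro l acc h
    have : l = [] := List.eq_nil_of_length_eq_zero (Nat.le_zero.mp h)
    subst this
    simp [PySem.Chars.count.go]
  | succ n ih =>
    intro l acc h
    cases l with
    | nil => simp [PySem.Chars.count.go]
    | cons hd t =>
      simp only [PySem.Chars.count.go]
      by_cases hc : c = hd
      · subst hc
        have hpre : List.isPrefixOf [c] (c :: t) = true := by
          simp [List.isPrefixOf]
        simp only [hpre, if_pos]
        rw [show List.drop (List.length [c]) (c :: t) = t by simp]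
        rw [ih t (acc + 1) (by simpa using Nat.lt_succ_iff.mp (Nat.lt_of_lt_of_le (by simp) h))]
        simp [List.count_cons]
        omega
      · have hpre : List.isPrefixOf [c] (hd :: t) = false := by
          simp [List.isPrefixOf, hc]
        simp only [hpre]
        simp only [Bool.false_eq_true, if_false]
        rw [ih t acc (by simpa using Nat.succ_le_succ_iff.mp h)]
        simp [List.count_cons, Ne.symm hc]

theorem chars_count_singleton (l : List Char) (c : Char) :
    PySem.Chars.count l [c] = l.count c := by
  unfold PySem.Chars.count
  simp only [List.isEmpty_cons, if_false, Bool.false_eq_true]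
  exact (count_go_singleton c l.length l 0 (le_refl _)).trans (by omega)

theorem foldl_rarity (l : List Char) (acc : Int) :
    l.foldl
      (fun rarity char =>
        if char ∈ (['0', '6', '9'] : List Char) then rarity + 1
        else if char = '8' then rarity + 2
        else rarity) acc
    = acc + (l.count '0' : Int) + (l.count '6' : Int) + (l.count '9' : Int)
        + 2 * (l.count '8' : Int) := by
  induction l generalizing acc with
  | nil => simp
  | cons hd t ih =>
    simp only [List.foldl_cons, ih, List.count_cons]
    by_cases h0 : hd = '0'
    · subst h0; simp; push_cast; ring
    · by_cases h6 : hd = '6'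
      · subst h6; simp; push_cast; ring
      · by_cases h9 : hd = '9'
        · subst h9; simp [h0, h6]; push_cast; ring
        · by_cases h8 : hd = '8'
          · subst h8; simp [h0, h6, h9]; push_cast; ring
          · simp [h0, h6, h8, h9]

-- ===== VERDICT (by name: the statement is the Claim_ definition above) =====
theorem checkRarity_spec : Claim_equal_checkRarity := by
  intro hhmm _
  unfold Spec_checkRarity checkRarity checkRarity_alt
  rw [foldl_rarity]
  simp only [PySem.Str.count_eq]
  rw [show ("0" : String).toList = ['0'] from rfl, show ("6" : String).toList = ['6'] from rfl,
      show ("9" : String).toList = ['9'] from rfl, show ("8" : String).toList = ['8'] from rfl]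
  rw [chars_count_singleton, chars_count_singleton, chars_count_singleton, chars_count_singleton]
  ring
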